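-- pv_equiv track=rewrite | github.com/lukablagoje/three-dimensional-shape-connectivity-physical-network | 4. link_confinement_measure/1. find_collisions.py | intersecting_bodyid_from_kd_tree
-- ===== SOURCE A (Python) =====
-- def intersecting_bodyid_from_kd_tree(intersections, dict_of_all_points):
--     """
--     Identifies unique bodies (or segments) intersecting based on indices from KD-tree queries.
--
--     Parameters:
--     - intersections (list): A list of lists where each sublist contains indices of points intersecting a query.
--     - dict_of_all_points (dict): A dictionary mapping the index of a point in a KD-tree to its corresponding body ID.
--
--     Returns:
--     - bodyid_intersected (list): A list of unique body IDs that intersect the query.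
--     """
--     # Flatten the list of intersections and remove duplicates to get unique point indices
--     point_indices = set(num for sublist in intersections for num in sublist)
--
--     # Initialize a list to store the body IDs of intersecting points
--     bodyid_intersected = []
--     for points_index in point_indices:
--         # Retrieve the body ID corresponding to each intersecting point index
--         for i, point_key in enumerate(sorted(dict_of_all_points.keys())):
--             if point_key >= points_index:
--                 bodyid_intersected.append(dict_of_all_points[point_key])
--                 break
--
--     return bodyid_intersected
-- ===== SOURCE B (Python) =====
-- def intersecting_bodyid_from_kd_tree(intersections, dict_of_all_points):
--     # Sort the dict keys ONCE, align their values, and binary-search each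
--     # intersecting point index instead of re-sorting and linearly scanning
--     # the keys for every point.
--     keys = sorted(dict_of_all_points.keys())
--     vals = [dict_of_all_points[k] for k in keys]
--     n = len(keys)
--     bodyid_intersected = []
--     for points_index in set(num for sublist in intersections for num in sublist):
--         lo, hi = 0, n
--         while lo < hi:
--             mid = (lo + hi) // 2
--             if keys[mid] < points_index:
--                 lo = mid + 1
--             else:
--                 hi = mid
--         if lo < n:
--             bodyid_intersected.append(vals[lo])
--     return bodyid_intersected
-- ===== Notes on version B (the rewrite author's own statement) =====
-- stated objective: faster
-- what changed: B sorts the dict keys once and binary-searches each unique point index (with values pre-aligned to the sorted keys), instead of A's re-sorting all keys and linearly scanning them for every point index.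
import Mathlib
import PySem

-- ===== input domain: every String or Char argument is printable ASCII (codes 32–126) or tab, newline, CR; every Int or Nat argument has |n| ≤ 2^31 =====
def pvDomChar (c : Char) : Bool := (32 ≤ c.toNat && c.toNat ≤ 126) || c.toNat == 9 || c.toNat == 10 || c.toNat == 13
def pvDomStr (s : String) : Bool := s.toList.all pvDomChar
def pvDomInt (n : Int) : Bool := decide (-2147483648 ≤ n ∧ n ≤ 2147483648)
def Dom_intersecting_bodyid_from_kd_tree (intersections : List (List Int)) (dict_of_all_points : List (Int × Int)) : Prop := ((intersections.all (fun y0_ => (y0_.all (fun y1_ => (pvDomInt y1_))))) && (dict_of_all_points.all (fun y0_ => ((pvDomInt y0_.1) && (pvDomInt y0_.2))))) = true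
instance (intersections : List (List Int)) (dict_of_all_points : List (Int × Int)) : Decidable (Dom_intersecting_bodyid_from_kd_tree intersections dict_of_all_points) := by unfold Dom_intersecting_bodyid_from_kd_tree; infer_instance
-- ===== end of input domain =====

-- ===== PORT A =====
-- B re-implements A (sort keys once + binary search per point instead of
-- re-sorting and linearly scanning the keys for every point); equal output.
-- A-side helper: the inner 'for point_key in sorted(keys): if point_key >= x: append; break'
def pvFirstGE : List Int → Int → Option Int
  | [], _ => none
  | k :: ks, x => if x ≤ k then some k else pvFirstGE ks x

def intersecting_bodyid_from_kd_tree (intersections : List (List Int)) (dict_of_all_points : List (Int × Int)) : List Int :=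
  let d := PySem.Dict.ofList dict_of_all_points
  let point_indices := PySem.Set.ofList (intersections.flatMap (fun sublist => sublist))
  point_indices.foldl (fun bodyid_intersected points_index =>
    match pvFirstGE (PySem.List.sorted (PySem.Dict.keys d) (fun k => k) false) points_index with
    | some point_key => bodyid_intersected ++ [PySem.Dict.getD d point_key 0]
    | none => bodyid_intersected) []

-- ===== PORT B =====
-- B-side helper: the hand-rolled bisect_left loop 'while lo < hi: …'
def pvBisect (keys : List Int) (x : Int) (lo hi : Nat) : Nat :=
  if h : lo < hi then
    let mid := (lo + hi) / 2
    if keys.getD mid 0 < x then pvBisect keys x (mid + 1) hi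
    else pvBisect keys x lo mid
  else lo
termination_by hi - lo
decreasing_by all_goals omega

def intersecting_bodyid_from_kd_tree_alt (intersections : List (List Int)) (dict_of_all_points : List (Int × Int)) : List Int :=
  let d := PySem.Dict.ofList dict_of_all_points
  let keys := PySem.List.sorted (PySem.Dict.keys d) (fun k => k) false
  let vals := keys.map (fun k => PySem.Dict.getD d k 0)
  let n := keys.length
  let point_indices := PySem.Set.ofList (intersections.flatMap (fun sublist => sublist))
  point_indices.foldl (fun bodyid_intersected points_index =>
    let lo := pvBisect keys points_index 0 n
    if lo < n then bodyid_intersected ++ [vals.getD lo 0] else bodyid_intersected) []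

-- ===== PRECONDITION & SPEC =====
def Spec_intersecting_bodyid_from_kd_tree (intersections : List (List Int)) (dict_of_all_points : List (Int × Int)) (out : List Int) : Prop := out = intersecting_bodyid_from_kd_tree_alt intersections dict_of_all_points
instance (intersections : List (List Int)) (dict_of_all_points : List (Int × Int)) (out : List Int) : Decidable (Spec_intersecting_bodyid_from_kd_tree intersections dict_of_all_points out) := by unfold Spec_intersecting_bodyid_from_kd_tree; infer_instance

-- ===== CLAIM (what is proved, stated in full; the proofs are below) =====
def Claim_equal_intersecting_bodyid_from_kd_tree : Prop := ∀ (intersections : List (List Int)) (dict_of_all_points : List (Int × Int)), Dom_intersecting_bodyid_from_kd_tree intersections dict_of_all_points → Spec_intersecting_bodyid_from_kd_tree intersections dict_of_all_points (intersecting_bodyid_from_kd_tree intersections dict_of_all_points)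

-- ===== LEMMAS AND PROOFS =====

theorem pvFirstGE_eq_find? (ks : List Int) (x : Int) :
    pvFirstGE ks x = ks.find? (fun k => decide (x ≤ k)) := by
  induction ks with
  | nil => rfl
  | cons k ks ih => by_cases h : x ≤ k <;> simp [pvFirstGE, List.find?, h, ih]

theorem pvSorted_mono (ks : List Int) (hp : ks.Pairwise (· ≤ ·)) {i j : Nat}
    (hij : i ≤ j) (hj : j < ks.length) : ks[i]'(by omega) ≤ ks[j] := by
  rcases Nat.lt_or_ge i j with h | h
  · exact (List.pairwise_iff_getElem.mp hp) i j (by omega) hj h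
  · have : i = j := by omega
    subst this; exact le_refl _

theorem pvFindIdx_eq_of (ks : List Int) (p : Int → Bool) :
    ∀ n : Nat, n ≤ ks.length →
    (∀ i : Nat, (hi : i < ks.length) → i < n → p ks[i] = false) →
    (∀ hn : n < ks.length, p ks[n] = true) →
    ks.findIdx p = n := by
  induction ks with
  | nil =>
    intro n hn _ _
    simp only [List.length_nil, Nat.le_zero] at hn
    subst hn
    rfl
  | cons k ks ih =>
    intro n hn hbelow hat
    cases n with
    | zero =>
      have := hat (by simp)
      simp only [List.findIdx_cons]
      simp only [List.getElem_cons_zero] at this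
      simp [this]
    | succ m =>
      have h0 : p k = false := by
        have := hbelow 0 (by simp) (by omega)
        simpa using this
      simp only [List.findIdx_cons, h0, cond_false]
      have : ks.findIdx p = m := by
        apply ih m (by simpa using hn)
        · intro i hi him
          have := hbelow (i + 1) (by simpa using hi) (by omega)
          simpa using this
        · intro hm
          have := hat (by simpa using hm)
          simpa using this
      omega

theorem pvBisect_eq_findIdx_aux (ks : List Int) (x : Int) (hp : ks.Pairwise (· ≤ ·)) :
    ∀ fuel lo hi : Nat, hi - lo ≤ fuel → lo ≤ hi → hi ≤ ks.length →
    (∀ i : Nat, (hi' : i < ks.length) → i < lo → decide (x ≤ ks[i]) = false) →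
    (∀ i : Nat, (hi' : i < ks.length) → hi ≤ i → decide (x ≤ ks[i]) = true) →
    pvBisect ks x lo hi = ks.findIdx (fun k => decide (x ≤ k)) := by
  intro fuel
  induction fuel with
  | zero =>
    intro lo hi hfuel hlh hhi hbelow habove
    have hEq : lo = hi := by omega
    rw [pvBisect]
    simp only [show ¬ lo < hi by omega, dite_false]
    exact (pvFindIdx_eq_of ks _ lo (by omega)
      (fun i hi' hil => hbelow i hi' hil)
      (fun hn => habove lo hn (by omega))).symm
  | succ f ihf =>
    intro lo hi hfuel hlh hhi hbelow habove
    rw [pvBisect]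
    by_cases h : lo < hi
    · simp only [h, dite_true]
      have hmid1 : lo ≤ (lo + hi) / 2 := by omega
      have hmid2 : (lo + hi) / 2 < hi := by omega
      have hmlen : (lo + hi) / 2 < ks.length := by omega
      have hget : ks.getD ((lo + hi) / 2) 0 = ks[(lo + hi) / 2] :=
        List.getD_eq_getElem ks 0 hmlen
      by_cases hc : ks.getD ((lo + hi) / 2) 0 < x
      · simp only [hc, if_true]
        apply ihf ((lo + hi) / 2 + 1) hi (by omega) (by omega) hhi
        · intro i hi' hil
          have hik : ks[i] ≤ ks[(lo + hi) / 2] := pvSorted_mono ks hp (by omega) hmlen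
          rw [hget] at hc
          simp only [decide_eq_false_iff_not, not_le]
          omega
        · exact habove
      · simp only [hc, if_false]
        apply ihf lo ((lo + hi) / 2) (by omega) (by omega) (by omega) hbelow
        · intro i hi' hmi
          have hik : ks[(lo + hi) / 2] ≤ ks[i] := pvSorted_mono ks hp hmi hi'
          rw [hget] at hc
          simp only [decide_eq_true_eq]
          omega
    · simp only [h, dite_false]
      have hEq : lo = hi := by omega
      exact (pvFindIdx_eq_of ks _ lo (by omega)
        (fun i hi' hil => hbelow i hi' hil)
        (fun hn => habove lo hn (by omega))).symm

theorem pvBisect_eq_findIdx (ks : List Int) (x : Int) (hp : ks.Pairwise (· ≤ ·)) :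
    pvBisect ks x 0 ks.length = ks.findIdx (fun k => decide (x ≤ k)) := by
  exact pvBisect_eq_findIdx_aux ks x hp ks.length 0 ks.length (by omega) (by omega) (by omega)
    (fun i _ h => by omega) (fun i hi' h => by omega)

theorem pvStep_eq (d : PySem.Dict Int Int) (x : Int) (acc : List Int)
    (ks : List Int) (hp : ks.Pairwise (· ≤ ·)) :
    (match pvFirstGE ks x with
     | some point_key => acc ++ [PySem.Dict.getD d point_key 0]
     | none => acc)
    = (if pvBisect ks x 0 ks.length < ks.length
       then acc ++ [(ks.map (fun k => PySem.Dict.getD d k 0)).getD (pvBisect ks x 0 ks.length) 0]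
       else acc) := by
  rw [pvFirstGE_eq_find?, pvBisect_eq_findIdx ks x hp, List.find?_eq_getElem?_findIdx]
  set j := ks.findIdx (fun k => decide (x ≤ k)) with hj
  by_cases h : j < ks.length
  · simp [h]
  · simp [h]

-- ===== VERDICT (by name: the statement is the Claim_ definition above) =====
theorem intersecting_bodyid_from_kd_tree_spec : Claim_equal_intersecting_bodyid_from_kd_tree := by
  intro intersections dict_of_all_points _
  unfold Spec_intersecting_bodyid_from_kd_tree
  unfold intersecting_bodyid_from_kd_tree intersecting_bodyid_from_kd_tree_alt
  apply PySem.List.foldl_congr_mem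
  intro acc x _
  have hp : (PySem.List.sorted (PySem.Dict.keys (PySem.Dict.ofList dict_of_all_points)) (fun k => k) false).Pairwise (· ≤ ·) := by
    have := PySem.List.sorted_pairwise (PySem.Dict.keys (PySem.Dict.ofList dict_of_all_points)) (fun k => k)
    simpa using this
  exact pvStep_eq _ x acc _ hp
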